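-- pv_equiv track=rewrite | github.com/Marmo77/MATURA_INFORMATYKA_2026 | Maj_2022/Maj_2022/zadanie1/zadanie2.py | Koduj
-- ===== SOURCE A (Python) =====
-- def Koduj(n):
--     if n == 1:
--         return ""
--     else:
--         k = n // 2
--         if k % 2 == 0:
--             return Koduj(k) + "A"
--         else:
--             return "B"+ Koduj(k)
-- ===== SOURCE B (Python) =====
-- def Koduj(n):
--     a = 0
--     b = 0
--     while n != 1:
--         k = n // 2
--         if k % 2 == 0:
--             a += 1
--         else:
--             b += 1
--         n = k
--     return "B" * b + "A" * a
-- ===== Notes on version B (the rewrite author's own statement) =====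
-- stated objective: simpler
-- what changed: Replaces the recursion that splices 'B' on the left and 'A' on the right with an iterative loop that only counts even/odd halving steps and builds the answer once as 'B'*b + 'A'*a, using the invariant that every B lands left of every A.
import Mathlib
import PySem

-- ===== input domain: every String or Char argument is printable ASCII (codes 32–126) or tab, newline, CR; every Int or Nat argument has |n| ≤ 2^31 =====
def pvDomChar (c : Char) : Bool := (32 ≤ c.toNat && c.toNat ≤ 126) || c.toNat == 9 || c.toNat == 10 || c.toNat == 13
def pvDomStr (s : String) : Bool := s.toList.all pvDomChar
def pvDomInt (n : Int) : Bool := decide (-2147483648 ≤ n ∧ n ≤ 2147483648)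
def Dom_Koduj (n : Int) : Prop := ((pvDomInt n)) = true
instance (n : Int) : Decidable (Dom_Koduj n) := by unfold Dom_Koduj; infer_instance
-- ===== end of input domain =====

-- B replaces A's recursion (prepend 'B' / append 'A') by a counting loop and builds "B"*b + "A"*a once; objective: simpler.

-- ===== PORT A =====
-- Python string concatenation is modeled as List Char append; Koduj converts once at the top.
-- fuel makes the recursion total in Lean; n.toNat steps are more than enough for every n ≥ 1
-- (n is at least halved each step), and Pre_ excludes n ≤ 0 where Python recurses forever.
def kodujA : Nat → Int → List Char
  | 0, _ => []
  | fuel+1, n =>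
    if n == 1 then []
    else
      let k := PySem.Int.floordiv n 2
      if PySem.Int.mod k 2 == 0 then kodujA fuel k ++ ['A']
      else 'B' :: kodujA fuel k

def Koduj (n : Int) : String := String.ofList (kodujA n.toNat n)

-- ===== PORT B =====
-- the while-loop of Source B, carrying the counters (a, b); same fuel bound as A's port
def kodujLoop : Nat → Int → Nat → Nat → Nat × Nat
  | 0, _, a, b => (a, b)
  | fuel+1, n, a, b =>
    if n == 1 then (a, b)
    else
      let k := PySem.Int.floordiv n 2
      if PySem.Int.mod k 2 == 0 then kodujLoop fuel k (a+1) b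
      else kodujLoop fuel k a (b+1)

def Koduj_alt (n : Int) : String :=
  let ab := kodujLoop n.toNat n 0 0
  String.ofList (List.replicate ab.2 'B' ++ List.replicate ab.1 'A')

-- ===== PRECONDITION & SPEC =====
-- Excluded: for non-positive n, Python A recurses without bound (RecursionError) and B's while-loop never terminates, so neither returns.
def Pre_Koduj (n : Int) : Prop := 1 ≤ n
instance (n : Int) : Decidable (Pre_Koduj n) := by unfold Pre_Koduj; infer_instance
def pvWitness_Koduj : Int := (37)

def Spec_Koduj (n : Int) (out : String) : Prop := out = Koduj_alt n
instance (n : Int) (out : String) : Decidable (Spec_Koduj n out) := by unfold Spec_Koduj; infer_instance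

-- ===== CLAIM (what is proved, stated in full; the proofs are below) =====
def Claim_equal_Koduj : Prop := ∀ (n : Int), Dom_Koduj n → Pre_Koduj n → Spec_Koduj n (Koduj n)

-- ===== LEMMAS AND PROOFS =====

-- the counters are accumulators: running the loop from (a, b) just shifts the result
theorem kodujLoop_acc (fuel : Nat) : ∀ (n : Int) (a b : Nat),
    kodujLoop fuel n a b = (a + (kodujLoop fuel n 0 0).1, b + (kodujLoop fuel n 0 0).2) := by
  induction fuel with
  | zero => intro n a b; simp [kodujLoop]
  | succ f ih =>
    intro n a b
    simp only [kodujLoop]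
    by_cases h1 : n == 1
    · simp [h1]
    · by_cases h2 : PySem.Int.mod (PySem.Int.floordiv n 2) 2 == 0
      · simp only [h1, h2, Bool.false_eq_true, if_false, if_true]
        rw [ih _ (a+1) b, ih _ (0+1) 0]
        simp [Prod.ext_iff]; omega
      · simp only [h1, h2, Bool.false_eq_true, if_false]
        rw [ih _ a (b+1), ih _ 0 (0+1)]
        simp [Prod.ext_iff]; omega

-- A's recursion produces exactly b B's followed by a A's, where (a, b) counts the loop's cases
theorem kodujA_eq (fuel : Nat) : ∀ (n : Int),
    kodujA fuel n = List.replicate (kodujLoop fuel n 0 0).2 'B'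
                    ++ List.replicate (kodujLoop fuel n 0 0).1 'A' := by
  induction fuel with
  | zero => intro n; simp [kodujA, kodujLoop]
  | succ f ih =>
    intro n
    simp only [kodujA, kodujLoop]
    by_cases h1 : n == 1
    · simp [h1]
    · by_cases h2 : PySem.Int.mod (PySem.Int.floordiv n 2) 2 == 0
      · simp only [h1, h2, Bool.false_eq_true, if_false, if_true]
        rw [ih, kodujLoop_acc f _ (0+1) 0]
        simp [Nat.add_comm, List.replicate_succ', List.append_assoc]
      · simp only [h1, h2, Bool.false_eq_true, if_false]
        rw [ih, kodujLoop_acc f _ 0 (0+1)]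
        simp [Nat.add_comm, List.replicate_succ]

-- ===== VERDICT (by name: the statement is the Claim_ definition above) =====
theorem Koduj_spec : Claim_equal_Koduj := by
  intro n _ _
  unfold Spec_Koduj Koduj Koduj_alt
  rw [kodujA_eq]
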